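-- pv_equiv track=rewrite | github.com/iamobaidbhatt/bolt.diy | hotstar_cookie_validator.py | validate_jwt_format
-- ===== SOURCE A (Python) =====
-- def validate_jwt_format(token):
--     """Basic JWT format validation"""
--     if not token:
--         return False
--
--     parts = token.split('.')
--     if len(parts) != 3:
--         return False
--
--     # Check if each part is base64-like
--     import string
--     valid_chars = string.ascii_letters + string.digits + '-_='
--
--     for part in parts:
--         if not all(c in valid_chars for c in part):
--             return False
--
--     return True
-- ===== SOURCE B (Python) =====
-- import string
--
-- _VALID = string.ascii_letters + string.digits + '-_='
--
--
-- def validate_jwt_format(token):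
--     """Basic JWT format validation (single pass, no split)."""
--     if not token:
--         return False
--
--     dots = 0
--     for c in token:
--         if c == '.':
--             dots += 1
--         elif c not in _VALID:
--             return False
--     return dots == 2
-- ===== Notes on version B (the rewrite author's own statement) =====
-- stated objective: simpler
-- what changed: Replaces the split-into-parts + length check + nested per-part all() scans with a single pass over the token that counts separator dots and rejects invalid characters on the fly.
import Mathlib
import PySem

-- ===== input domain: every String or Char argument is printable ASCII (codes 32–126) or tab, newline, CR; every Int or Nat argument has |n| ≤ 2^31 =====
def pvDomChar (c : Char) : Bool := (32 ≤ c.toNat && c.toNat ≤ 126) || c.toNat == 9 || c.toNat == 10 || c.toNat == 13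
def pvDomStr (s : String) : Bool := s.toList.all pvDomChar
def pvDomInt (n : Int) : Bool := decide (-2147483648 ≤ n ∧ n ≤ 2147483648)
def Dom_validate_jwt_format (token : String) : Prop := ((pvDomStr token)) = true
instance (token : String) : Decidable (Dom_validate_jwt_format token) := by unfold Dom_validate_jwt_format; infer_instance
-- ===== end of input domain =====

-- B replaces split('.') + length check + nested per-part scans by a single pass
-- that counts dots and rejects invalid characters on the fly (objective: simpler).

-- ===== PORT A =====

-- valid_chars = string.ascii_letters + string.digits + '-_='
def pvValidChars : List Char :=
  "abcdefghijklmnopqrstuvwxyzABCDEFGHIJKLMNOPQRSTUVWXYZ0123456789-_=".toList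

-- the for-loop over parts with its early 'return False'
def pvLoopA : List (List Char) → Bool
  | [] => true
  | part :: rest =>
      -- 'c in valid_chars' for a single character c is exactly list membership
      if !(part.all (fun c => pvValidChars.contains c)) then false
      else pvLoopA rest

def validate_jwt_format (token : String) : Bool :=
  if token == "" then false
  else
    let parts := PySem.Chars.splitOn token.toList ['.']
    if parts.length ≠ 3 then false
    else pvLoopA parts

-- ===== PORT B =====

-- the for-loop over characters: dot counter, early 'return False' on a bad char
def pvLoopB : List Char → Nat → Bool
  | [], dots => dots == 2
  | c :: rest, dots =>
      if c == '.' then pvLoopB rest (dots + 1)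
      else if !(pvValidChars.contains c) then false
      else pvLoopB rest dots

def validate_jwt_format_alt (token : String) : Bool :=
  if token == "" then false
  else pvLoopB token.toList 0

-- ===== PRECONDITION & SPEC =====
def Spec_validate_jwt_format (token : String) (out : Bool) : Prop := out = validate_jwt_format_alt token
instance (token : String) (out : Bool) : Decidable (Spec_validate_jwt_format token out) := by unfold Spec_validate_jwt_format; infer_instance

-- ===== CLAIM (what is proved, stated in full; the proofs are below) =====
def Claim_equal_validate_jwt_format : Prop := ∀ (token : String), Dom_validate_jwt_format token → Spec_validate_jwt_format token (validate_jwt_format token)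

-- ===== LEMMAS AND PROOFS =====

-- reference model of splitting on a single '.' (proof-side only)
def pvSplitAux : List Char → List Char → List (List Char)
  | [], cur => [cur.reverse]
  | c :: rest, cur =>
      if c = '.' then cur.reverse :: pvSplitAux rest []
      else pvSplitAux rest (c :: cur)

theorem pvGo_spec (fuel : Nat) (l cur : List Char) (acc : List (List Char))
    (h : l.length < fuel) :
    PySem.Chars.splitOn.go ['.'] fuel l cur acc = acc.reverse ++ pvSplitAux l cur := by
  induction fuel generalizing l cur acc with
  | zero => omega
  | succ f ih =>
    cases l with
    | nil => simp [PySem.Chars.splitOn.go, pvSplitAux]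
    | cons c rest =>
      simp only [PySem.Chars.splitOn.go, List.isPrefixOf]
      by_cases hc : c = '.'
      · subst hc
        rw [if_pos (show (('.' == '.' && true) = true) by simp)]
        simp only [List.length_singleton, List.drop_succ_cons, List.drop_zero]
        rw [ih rest [] (cur.reverse :: acc) (by simp at h; omega)]
        simp [pvSplitAux]
      · rw [if_neg (show ¬ (('.' == c && true) = true) by
          simp; exact fun h' => hc h'.symm)]
        rw [ih rest (c :: cur) acc (by simp at h; omega)]
        simp [pvSplitAux, hc]

theorem pvSplitOn_eq (cs : List Char) :
    PySem.Chars.splitOn cs ['.'] = pvSplitAux cs [] := by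
  simpa using pvGo_spec (cs.length + 1) cs [] [] (by omega)

theorem pvSplitAux_length (cs cur : List Char) :
    (pvSplitAux cs cur).length = cs.count '.' + 1 := by
  induction cs generalizing cur with
  | nil => simp [pvSplitAux]
  | cons c rest ih =>
    by_cases hc : c = '.'
    · subst hc; simp [pvSplitAux, ih]
    · simp [pvSplitAux, hc, ih]

theorem pvLoopA_all (ps : List (List Char)) :
    pvLoopA ps = ps.all (fun p => p.all (fun c => pvValidChars.contains c)) := by
  induction ps with
  | nil => rfl
  | cons p rest ih =>
    cases h : p.all (fun c => pvValidChars.contains c) with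
    | true =>
      simp only [pvLoopA, h, Bool.not_true, Bool.false_eq_true, if_false,
        List.all_cons, Bool.true_and, ih]
    | false =>
      simp only [pvLoopA, h, Bool.not_false, if_pos, List.all_cons, Bool.false_and]

theorem pvSplitAux_all (cs cur : List Char) :
    (pvSplitAux cs cur).all (fun p => p.all (fun c => pvValidChars.contains c)) =
      (cur.all (fun c => pvValidChars.contains c) &&
       cs.all (fun c => c == '.' || pvValidChars.contains c)) := by
  induction cs generalizing cur with
  | nil => simp [pvSplitAux, List.all_reverse]
  | cons c rest ih =>
    by_cases hc : c = '.'
    · subst hc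
      simp only [pvSplitAux, if_true, List.all_cons, List.all_reverse, ih,
        List.all_nil, Bool.true_and, beq_self_eq_true, Bool.true_or]
    · simp only [pvSplitAux, if_neg hc, ih, List.all_cons,
        show (c == '.') = false from by simp [hc], Bool.false_or]
      cases pvValidChars.contains c <;>
        cases cur.all (fun c => pvValidChars.contains c) <;> simp

theorem pvLoopB_spec (cs : List Char) (dots : Nat) :
    pvLoopB cs dots =
      (cs.all (fun c => c == '.' || pvValidChars.contains c) &&
       decide (dots + cs.count '.' = 2)) := by
  induction cs generalizing dots with
  | nil =>
    by_cases hd : dots = 2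
    · simp [pvLoopB, hd]
    · simp [pvLoopB, hd]
  | cons c rest ih =>
    by_cases hc : c = '.'
    · subst hc
      simp only [pvLoopB, ih, List.all_cons, List.count_cons_self, beq_self_eq_true,
        Bool.true_or, Bool.true_and,
        show decide (dots + 1 + List.count '.' rest = 2) =
            decide (dots + (List.count '.' rest + 1) = 2) from
          decide_eq_decide.mpr (by omega)]
      rw [if_pos trivial]
    · simp only [pvLoopB, if_neg (show ¬ ((c == '.') = true) by simp [hc])]
      cases hv : pvValidChars.contains c with
      | true =>
        have hm : c ∈ pvValidChars := by simpa using hv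
        simp only [Bool.not_true, Bool.false_eq_true, if_false, ih]
        simp [List.all_cons, hc, hm]
      | false =>
        simp only [Bool.not_false, if_pos, List.all_cons, hv,
          show (c == '.') = false from by simp [hc], Bool.false_or, Bool.false_and]

-- ===== VERDICT (by name: the statement is the Claim_ definition above) =====
theorem validate_jwt_format_spec : Claim_equal_validate_jwt_format := by
  intro token _
  unfold Spec_validate_jwt_format validate_jwt_format validate_jwt_format_alt
  by_cases h : token == ""
  · simp [h]
  · simp only [h, Bool.false_eq_true, if_false]
    rw [pvSplitOn_eq, pvLoopA_all, pvSplitAux_all, pvLoopB_spec, pvSplitAux_length,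
      List.all_nil, Bool.true_and]
    by_cases h2 : token.toList.count '.' = 2
    · rw [if_neg (by omega)]
      rw [show decide (0 + token.toList.count '.' = 2) = true from by simp [h2]]
      simp
    · rw [if_pos (by omega)]
      rw [show decide (0 + token.toList.count '.' = 2) = false from by simp; omega]
      simp
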